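-- pv_equiv track=rewrite | github.com/Remisaurus/Winc | for/main.py | alphabet_set
-- ===== SOURCE A (Python) =====
-- def countryx(list):
--     for country in list:
--         if 'x' in country: return country
--         elif 'X' in country: return country
--
-- def countryj(list):
--     for country in list:
--         if 'j' in country: return country
--         elif 'J' in country: return country
--
-- def countryk(list):
--     for country in list:
--         if 'k' in country: return country
--         elif 'K' in country: return country
--
-- def countalphinstring(country):
--     counter = 0
--     if 'a' in country: counter = counter + 1
--     elif 'A' in country: counter = counter + 1
--     if 'b' in country: counter = counter + 1
--     elif 'B' in country: counter = counter + 1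
--     if 'c' in country: counter = counter + 1
--     elif 'C' in country: counter = counter + 1
--     if 'd' in country: counter = counter + 1
--     elif 'D' in country: counter = counter + 1
--     if 'e' in country: counter = counter + 1
--     elif 'E' in country: counter = counter + 1
--     if 'f' in country: counter = counter + 1
--     elif 'F' in country: counter = counter + 1
--     if 'g' in country: counter = counter + 1
--     elif 'G' in country: counter = counter + 1
--     if 'h' in country: counter = counter + 1
--     elif 'H' in country: counter = counter + 1
--     if 'i' in country: counter = counter + 1
--     elif 'I' in country: counter = counter + 1
--     if 'j' in country: counter = counter + 1
--     elif 'J' in country: counter = counter + 1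
--     if 'k' in country: counter = counter + 1
--     elif 'K' in country: counter = counter + 1
--     if 'l' in country: counter = counter + 1
--     elif 'L' in country: counter = counter + 1
--     if 'm' in country: counter = counter + 1
--     elif 'M' in country: counter = counter + 1
--     if 'n' in country: counter = counter + 1
--     elif 'N' in country: counter = counter + 1
--     if 'o' in country: counter = counter + 1
--     elif 'O' in country: counter = counter + 1
--     if 'p' in country: counter = counter + 1
--     elif 'P' in country: counter = counter + 1
--     if 'q' in country: counter = counter + 1
--     elif 'Q' in country: counter = counter + 1
--     if 'r' in country: counter = counter + 1
--     elif 'R' in country: counter = counter + 1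
--     if 's' in country: counter = counter + 1
--     elif 'S' in country: counter = counter + 1
--     if 't' in country: counter = counter + 1
--     elif 'T' in country: counter = counter + 1
--     if 'u' in country: counter = counter + 1
--     elif 'U' in country: counter = counter + 1
--     if 'v' in country: counter = counter + 1
--     elif 'V' in country: counter = counter + 1
--     if 'w' in country: counter = counter + 1
--     elif 'W' in country: counter = counter + 1
--     if 'x' in country: counter = counter + 1
--     elif 'X' in country: counter = counter + 1
--     if 'y' in country: counter = counter + 1
--     elif 'Y' in country: counter = counter + 1
--     if 'z' in country: counter = counter + 1
--     elif 'Z' in country: counter = counter + 1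
--     return counter
--
-- def countalphchars(list):
--     alphcountlist= []
--     for country in list:
--        alphcountlist.append(countalphinstring(country))
--     return sorted(alphcountlist, reverse=True)
--
-- def alphabet_set(list):    #number 1 to 8 and j+k+x
--     result = []
--     for country in list:
--         if countalphinstring(country) == countalphchars(list)[0]: # has 17 unique alphabet characters
--             result.append(country)
--         if countalphinstring(country) == countalphchars(list)[1]: # has 15 unique alphabet characters
--             result.append(country)
--         if countalphinstring(country) == countalphchars(list)[2]: # both have 14 unique alphabet characters
--             result.append(country)
--         if countalphinstring(country) == countalphchars(list)[4]: # four countries with 13 unique alphabet characters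
--             result.append(country)
--
--
--     # I misunderstood the exersize, the missing letters were j,k and x with my top 8 so these I added in this manner,
--     # I do not think this exersize was meant to waste too much time and since I already wasted somuch I took a shortcut.
--     result.append(countryx(list))
--     result.append(countryj(list))
--     result.append(countryk(list))
--
--
--     return result
-- ===== SOURCE B (Python) =====
-- def alphabet_set(list):
--     counts = [len({ch.lower() for ch in country if 'a' <= ch.lower() <= 'z'})
--               for country in list]
--     ranked = sorted(counts, reverse=True)
--     targets = [ranked[0], ranked[1], ranked[2], ranked[4]]
--     result = [c for c, n in zip(list, counts) for t in targets if n == t]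
--     for letter in 'xjk':
--         result.append(next((c for c in list if letter in c.lower()), None))
--     return result
-- ===== Notes on version B (the rewrite author's own statement) =====
-- stated objective: faster
-- what changed: B counts each country's distinct letters with one case-folded set instead of A's 52-branch if/elif chain, builds the descending-sorted count list once instead of recomputing and re-sorting it four times per country inside the selection loop, and finds the x/j/k countries with first-match scans over lowercased strings.
-- outside the precondition, e.g. on alphabet_set([]): A returns [None, None, None], B raises IndexError
import Mathlib
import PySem

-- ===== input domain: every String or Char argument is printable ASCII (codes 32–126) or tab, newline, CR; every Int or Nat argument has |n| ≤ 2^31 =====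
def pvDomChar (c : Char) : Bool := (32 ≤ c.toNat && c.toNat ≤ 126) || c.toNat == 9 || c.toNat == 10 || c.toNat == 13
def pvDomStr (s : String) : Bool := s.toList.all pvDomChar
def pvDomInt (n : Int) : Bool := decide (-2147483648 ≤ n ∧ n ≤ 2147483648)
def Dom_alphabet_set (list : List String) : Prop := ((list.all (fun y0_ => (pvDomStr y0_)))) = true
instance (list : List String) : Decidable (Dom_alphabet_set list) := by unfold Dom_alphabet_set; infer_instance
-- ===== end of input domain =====

-- B replaces the 52-branch per-letter counter by a set-based distinct-letter count, computes
-- the sorted count list once instead of re-sorting it inside the selection loop, and uses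
-- find? for the x/j/k lookups (objective: faster).

-- ===== PORT A =====
def countryx (l : List String) : Option String :=
  match l with
  | [] => none
  | country :: rest =>
    if PySem.Str.isIn "x" country then some country
    else if PySem.Str.isIn "X" country then some country
    else countryx rest

def countryj (l : List String) : Option String :=
  match l with
  | [] => none
  | country :: rest =>
    if PySem.Str.isIn "j" country then some country
    else if PySem.Str.isIn "J" country then some country
    else countryj rest

def countryk (l : List String) : Option String :=
  match l with
  | [] => none
  | country :: rest =>
    if PySem.Str.isIn "k" country then some country
    else if PySem.Str.isIn "K" country then some country
    else countryk rest

def countalphinstring (country : String) : Int :=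
  let counter : Int := 0
  let counter := if PySem.Str.isIn "a" country then counter + 1 else if PySem.Str.isIn "A" country then counter + 1 else counter
  let counter := if PySem.Str.isIn "b" country then counter + 1 else if PySem.Str.isIn "B" country then counter + 1 else counter
  let counter := if PySem.Str.isIn "c" country then counter + 1 else if PySem.Str.isIn "C" country then counter + 1 else counter
  let counter := if PySem.Str.isIn "d" country then counter + 1 else if PySem.Str.isIn "D" country then counter + 1 else counter
  let counter := if PySem.Str.isIn "e" country then counter + 1 else if PySem.Str.isIn "E" country then counter + 1 else counter
  let counter := if PySem.Str.isIn "f" country then counter + 1 else if PySem.Str.isIn "F" country then counter + 1 else counter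
  let counter := if PySem.Str.isIn "g" country then counter + 1 else if PySem.Str.isIn "G" country then counter + 1 else counter
  let counter := if PySem.Str.isIn "h" country then counter + 1 else if PySem.Str.isIn "H" country then counter + 1 else counter
  let counter := if PySem.Str.isIn "i" country then counter + 1 else if PySem.Str.isIn "I" country then counter + 1 else counter
  let counter := if PySem.Str.isIn "j" country then counter + 1 else if PySem.Str.isIn "J" country then counter + 1 else counter
  let counter := if PySem.Str.isIn "k" country then counter + 1 else if PySem.Str.isIn "K" country then counter + 1 else counter
  let counter := if PySem.Str.isIn "l" country then counter + 1 else if PySem.Str.isIn "L" country then counter + 1 else counter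
  let counter := if PySem.Str.isIn "m" country then counter + 1 else if PySem.Str.isIn "M" country then counter + 1 else counter
  let counter := if PySem.Str.isIn "n" country then counter + 1 else if PySem.Str.isIn "N" country then counter + 1 else counter
  let counter := if PySem.Str.isIn "o" country then counter + 1 else if PySem.Str.isIn "O" country then counter + 1 else counter
  let counter := if PySem.Str.isIn "p" country then counter + 1 else if PySem.Str.isIn "P" country then counter + 1 else counter
  let counter := if PySem.Str.isIn "q" country then counter + 1 else if PySem.Str.isIn "Q" country then counter + 1 else counter
  let counter := if PySem.Str.isIn "r" country then counter + 1 else if PySem.Str.isIn "R" country then counter + 1 else counter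
  let counter := if PySem.Str.isIn "s" country then counter + 1 else if PySem.Str.isIn "S" country then counter + 1 else counter
  let counter := if PySem.Str.isIn "t" country then counter + 1 else if PySem.Str.isIn "T" country then counter + 1 else counter
  let counter := if PySem.Str.isIn "u" country then counter + 1 else if PySem.Str.isIn "U" country then counter + 1 else counter
  let counter := if PySem.Str.isIn "v" country then counter + 1 else if PySem.Str.isIn "V" country then counter + 1 else counter
  let counter := if PySem.Str.isIn "w" country then counter + 1 else if PySem.Str.isIn "W" country then counter + 1 else counter
  let counter := if PySem.Str.isIn "x" country then counter + 1 else if PySem.Str.isIn "X" country then counter + 1 else counter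
  let counter := if PySem.Str.isIn "y" country then counter + 1 else if PySem.Str.isIn "Y" country then counter + 1 else counter
  let counter := if PySem.Str.isIn "z" country then counter + 1 else if PySem.Str.isIn "Z" country then counter + 1 else counter
  counter

def countalphchars (l : List String) : List Int :=
  let alphcountlist := l.foldl (fun acc country => acc ++ [countalphinstring country]) []
  PySem.List.sorted alphcountlist (fun x => x) true

-- Python indexes countalphchars(list)[i] (IndexError when the list is short, excluded by
-- Pre_); both ports totalize that lookup with the impossible count -1.
def alphabet_set (list : List String) : List (Option String) :=
  let result : List (Option String) :=
    list.foldl (fun result country =>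
      let result := if countalphinstring country = PySem.List.pyGetD (countalphchars list) 0 (-1) then result ++ [some country] else result
      let result := if countalphinstring country = PySem.List.pyGetD (countalphchars list) 1 (-1) then result ++ [some country] else result
      let result := if countalphinstring country = PySem.List.pyGetD (countalphchars list) 2 (-1) then result ++ [some country] else result
      let result := if countalphinstring country = PySem.List.pyGetD (countalphchars list) 4 (-1) then result ++ [some country] else result
      result) []
  let result := result ++ [countryx list]
  let result := result ++ [countryj list]
  result ++ [countryk list]

-- ===== PORT B =====
-- len({ch.lower() for ch in country if 'a' <= ch.lower() <= 'z'})
def pvCountB (country : String) : Int :=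
  ((PySem.Set.ofList ((country.toList.filter
      (fun ch => decide ('a' ≤ PySem.Chars.lowerChar ch) && decide (PySem.Chars.lowerChar ch ≤ 'z'))).map
      PySem.Chars.lowerChar)).length : Int)

-- next((c for c in list if letter in c.lower()), None)
def pvFirstWith (letter : String) (l : List String) : Option String :=
  l.find? (fun c => PySem.Str.isIn letter (PySem.Str.lower c))

def alphabet_set_alt (list : List String) : List (Option String) :=
  let counts := list.map pvCountB
  let ranked := PySem.List.sorted counts (fun x => x) true
  let targets := [PySem.List.pyGetD ranked 0 (-1), PySem.List.pyGetD ranked 1 (-1),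
                  PySem.List.pyGetD ranked 2 (-1), PySem.List.pyGetD ranked 4 (-1)]
  let result := (list.zip counts).flatMap
    (fun p => (targets.filter (fun t => p.2 == t)).map (fun _ => (some p.1 : Option String)))
  result ++ (["x", "j", "k"].map (fun letter => pvFirstWith letter list))

-- ===== PRECONDITION & SPEC =====
-- Pre_ excludes lists of fewer than 5 countries: on 1-4 countries the Python A raises
-- IndexError, and on the empty list A's skipped loop accidentally returns [None, None, None]
-- while B's eager rank lookup raises IndexError.
def Pre_alphabet_set (list : List String) : Prop := 5 ≤ list.length
instance (list : List String) : Decidable (Pre_alphabet_set list) := by unfold Pre_alphabet_set; infer_instance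
def pvWitness_alphabet_set : List String := ["Mexico", "Japan", "Kenya", "Peru", "Chad"]
def Spec_alphabet_set (list : List String) (out : List (Option String)) : Prop := out = alphabet_set_alt list
instance (list : List String) (out : List (Option String)) : Decidable (Spec_alphabet_set list out) := by unfold Spec_alphabet_set; infer_instance

-- ===== CLAIM (what is proved, stated in full; the proofs are below) =====
def Claim_equal_alphabet_set : Prop := ∀ (list : List String), Dom_alphabet_set list → Pre_alphabet_set list → Spec_alphabet_set list (alphabet_set list)

-- ===== LEMMAS AND PROOFS =====
def pvPairs : List (Char × Char) := [('a', 'A'), ('b', 'B'), ('c', 'C'), ('d', 'D'), ('e', 'E'), ('f', 'F'), ('g', 'G'), ('h', 'H'), ('i', 'I'), ('j', 'J'), ('k', 'K'), ('l', 'L'), ('m', 'M'), ('n', 'N'), ('o', 'O'), ('p', 'P'), ('q', 'Q'), ('r', 'R'), ('s', 'S'), ('t', 'T'), ('u', 'U'), ('v', 'V'), ('w', 'W'), ('x', 'X'), ('y', 'Y'), ('z', 'Z')]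

def pvSPairs : List (String × String) := [("a", "A"), ("b", "B"), ("c", "C"), ("d", "D"), ("e", "E"), ("f", "F"), ("g", "G"), ("h", "H"), ("i", "I"), ("j", "J"), ("k", "K"), ("l", "L"), ("m", "M"), ("n", "N"), ("o", "O"), ("p", "P"), ("q", "Q"), ("r", "R"), ("s", "S"), ("t", "T"), ("u", "U"), ("v", "V"), ("w", "W"), ("x", "X"), ("y", "Y"), ("z", "Z")]

def pvAlphabet : List Char := ['a', 'b', 'c', 'd', 'e', 'f', 'g', 'h', 'i', 'j', 'k', 'l', 'm', 'n', 'o', 'p', 'q', 'r', 's', 't', 'u', 'v', 'w', 'x', 'y', 'z']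

def pvXs (s : List Char) : List Char :=
  (s.filter (fun ch => decide ('a' ≤ PySem.Chars.lowerChar ch) && decide (PySem.Chars.lowerChar ch ≤ 'z'))).map
    PySem.Chars.lowerChar

theorem pvCharLe (a b : Char) : a ≤ b ↔ a.toNat ≤ b.toNat := by
  rw [Char.le_def]; exact UInt32.le_iff_toNat_le ..

theorem pvCharEq (a b : Char) (h : a.toNat = b.toNat) : a = b := by
  rw [← Char.ofNat_toNat a, h, Char.ofNat_toNat]

theorem pvLowerCharToNat (ch : Char) :
    (PySem.Chars.lowerChar ch).toNat = if 65 ≤ ch.toNat ∧ ch.toNat ≤ 90 then ch.toNat + 32 else ch.toNat := by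
  have hiso : PySem.Chars.isupper ch = true ↔ (65 ≤ ch.toNat ∧ ch.toNat ≤ 90) := by
    simp [PySem.Chars.isupper, pvCharLe]
  rw [PySem.Chars.lowerChar]
  by_cases h : 65 ≤ ch.toNat ∧ ch.toNat ≤ 90
  · rw [if_pos (hiso.mpr h), if_pos h, Char.toNat_ofNat, if_pos]
    exact Or.inl (by omega)
  · rw [if_neg (fun hh => h (hiso.mp hh)), if_neg h]

theorem pvLowerEq (ch lo : Char) (h1 : 97 ≤ lo.toNat) (h2 : lo.toNat ≤ 122) :
    PySem.Chars.lowerChar ch = lo ↔ (ch = lo ∨ ch.toNat + 32 = lo.toNat) := by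
  constructor
  · intro h
    have ht := congrArg Char.toNat h
    rw [pvLowerCharToNat] at ht
    by_cases hup : 65 ≤ ch.toNat ∧ ch.toNat ≤ 90
    · right; rw [if_pos hup] at ht; omega
    · left; rw [if_neg hup] at ht; exact pvCharEq _ _ ht
  · rintro (rfl | h)
    · apply pvCharEq; rw [pvLowerCharToNat, if_neg (by omega)]
    · apply pvCharEq; rw [pvLowerCharToNat, if_pos (by omega)]; omega

theorem pvMemLower (lo hi : Char) (h1 : 97 ≤ lo.toNat) (h2 : lo.toNat ≤ 122)
    (hh : hi.toNat + 32 = lo.toNat) (s : List Char) :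
    lo ∈ PySem.Chars.lower s ↔ (lo ∈ s ∨ hi ∈ s) := by
  simp only [PySem.Chars.lower, List.mem_map]
  constructor
  · rintro ⟨ch, hch, heq⟩
    rcases (pvLowerEq ch lo h1 h2).mp heq with rfl | hn
    · exact Or.inl hch
    · exact Or.inr ((pvCharEq ch hi (by omega)) ▸ hch)
  · rintro (h | h)
    · exact ⟨lo, h, (pvLowerEq lo lo h1 h2).mpr (Or.inl rfl)⟩
    · exact ⟨hi, h, (pvLowerEq hi lo h1 h2).mpr (Or.inr hh)⟩

theorem pvMemXs (lo hi : Char) (h1 : 97 ≤ lo.toNat) (h2 : lo.toNat ≤ 122)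
    (hh : hi.toNat + 32 = lo.toNat) (s : List Char) :
    lo ∈ pvXs s ↔ (lo ∈ s ∨ hi ∈ s) := by
  simp only [pvXs, List.mem_map, List.mem_filter]
  constructor
  · rintro ⟨ch, ⟨hch, _⟩, heq⟩
    rcases (pvLowerEq ch lo h1 h2).mp heq with rfl | hn
    · exact Or.inl hch
    · exact Or.inr ((pvCharEq ch hi (by omega)) ▸ hch)
  · rintro (h | h)
    · refine ⟨lo, ⟨h, ?_⟩, (pvLowerEq lo lo h1 h2).mpr (Or.inl rfl)⟩
      rw [(pvLowerEq lo lo h1 h2).mpr (Or.inl rfl)]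
      simp only [Bool.and_eq_true, decide_eq_true_eq, pvCharLe]
      have ha : ('a' : Char).toNat = 97 := by decide
      have hz : ('z' : Char).toNat = 122 := by decide
      constructor <;> omega
    · refine ⟨hi, ⟨h, ?_⟩, (pvLowerEq hi lo h1 h2).mpr (Or.inr hh)⟩
      rw [(pvLowerEq hi lo h1 h2).mpr (Or.inr hh)]
      simp only [Bool.and_eq_true, decide_eq_true_eq, pvCharLe]
      have ha : ('a' : Char).toNat = 97 := by decide
      have hz : ('z' : Char).toNat = 122 := by decide
      constructor <;> omega

theorem pvXs_range (s : List Char) (y : Char) (hy : y ∈ pvXs s) :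
    97 ≤ y.toNat ∧ y.toNat ≤ 122 := by
  simp only [pvXs, List.mem_map, List.mem_filter] at hy
  obtain ⟨ch, ⟨_, hpred⟩, heq⟩ := hy
  rw [heq] at hpred
  simp only [Bool.and_eq_true, decide_eq_true_eq, pvCharLe] at hpred
  exact hpred

theorem pvMemAlphabet (y : Char) : y ∈ pvAlphabet ↔ (97 ≤ y.toNat ∧ y.toNat ≤ 122) := by
  constructor
  · intro h; fin_cases h <;> decide
  · rintro ⟨h1, h2⟩
    rw [← Char.ofNat_toNat y]
    set n := y.toNat with hn
    interval_cases n <;> decide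

theorem pvSetLen (s : List Char) :
    (PySem.Set.ofList (pvXs s)).length =
      (pvAlphabet.filter (fun l => decide (l ∈ pvXs s))).length := by
  apply List.Perm.length_eq
  rw [List.perm_ext_iff_of_nodup (PySem.Set.nodup_ofList _) (List.Nodup.filter _ (by decide))]
  intro a
  simp only [PySem.Set.mem_ofList, List.mem_filter, pvMemAlphabet, decide_eq_true_eq]
  constructor
  · intro h; exact ⟨pvXs_range s a h, h⟩
  · exact fun h => h.2

theorem pvIsIn_single (a : Char) (sub s : String) (hsub : sub.toList = [a]) :
    PySem.Str.isIn sub s = decide (a ∈ s.toList) := by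
  rw [show PySem.Str.isIn sub s = decide (PySem.Str.isIn sub s = true) by simp]
  rw [decide_eq_decide]
  rw [PySem.Str.isIn_iff_infix, hsub]
  exact List.singleton_infix_iff a s.toList

theorem pvPairs_fact : ∀ p ∈ pvPairs,
    97 ≤ (p : Char × Char).1.toNat ∧ p.1.toNat ≤ 122 ∧ p.2.toNat + 32 = p.1.toNat := by decide

theorem pvSPairs_eq : pvSPairs = pvPairs.map (fun p => (String.ofList [p.1], String.ofList [p.2])) := by
  decide

theorem pvCountA_foldl (c : String) :
    countalphinstring c =
      pvSPairs.foldl (fun x p =>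
        if PySem.Str.isIn p.1 c then x + 1
        else if PySem.Str.isIn p.2 c then x + 1 else x) 0 := rfl

theorem pvCount_eq (c : String) : pvCountB c = countalphinstring c := by
  have hL : pvCountB c = ((pvPairs.countP (fun p => decide (p.1 ∈ pvXs c.toList))) : Int) := by
    rw [show pvCountB c = ((PySem.Set.ofList (pvXs c.toList)).length : Int) from rfl, pvSetLen,
        ← List.countP_eq_length_filter,
        show pvAlphabet = pvPairs.map Prod.fst from by decide, List.countP_map]
    rfl
  have hstep : ∀ (acc : Int) (p : Char × Char), p ∈ pvPairs →
      (if PySem.Str.isIn (String.ofList [p.1]) c then acc + 1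
       else if PySem.Str.isIn (String.ofList [p.2]) c then acc + 1 else acc) =
      (if decide (p.1 ∈ pvXs c.toList) = true then acc + 1 else acc) := by
    intro acc p hp
    obtain ⟨f1, f2, f3⟩ := pvPairs_fact p hp
    rw [pvIsIn_single p.1 _ c String.toList_ofList, pvIsIn_single p.2 _ c String.toList_ofList]
    by_cases hm : p.1 ∈ pvXs c.toList
    · rcases (pvMemXs p.1 p.2 f1 f2 f3 c.toList).mp hm with h | h <;> simp [hm, h]
    · have hmx := pvMemXs p.1 p.2 f1 f2 f3 c.toList
      have h1 : p.1 ∉ c.toList := fun h => hm (hmx.mpr (Or.inl h))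
      have h2 : p.2 ∉ c.toList := fun h => hm (hmx.mpr (Or.inr h))
      simp [hm, h1, h2]
  have hR : countalphinstring c
      = 0 + ((pvPairs.countP (fun p => decide (p.1 ∈ pvXs c.toList))) : Int) := by
    rw [pvCountA_foldl, pvSPairs_eq]
    simp only [List.foldl_map]
    rw [PySem.List.foldl_congr_mem pvPairs _ (fun x p =>
          if decide ((p : Char × Char).1 ∈ pvXs c.toList) = true then x + 1 else x) 0 hstep,
        PySem.List.foldl_if_add_one]
  rw [hL, hR]; omega

theorem pvLowerIsIn (lo hi : Char) (slo shi : String)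
    (hslo : slo.toList = [lo]) (hshi : shi.toList = [hi])
    (h1 : 97 ≤ lo.toNat) (h2 : lo.toNat ≤ 122) (hh : hi.toNat + 32 = lo.toNat) (c : String) :
    PySem.Str.isIn slo (PySem.Str.lower c) =
      (PySem.Str.isIn slo c || PySem.Str.isIn shi c) := by
  rw [pvIsIn_single lo slo _ hslo, pvIsIn_single lo slo c hslo, pvIsIn_single hi shi c hshi,
      PySem.Str.toList_lower]
  rw [show (decide (lo ∈ PySem.Chars.lower c.toList)) = decide (lo ∈ c.toList ∨ hi ∈ c.toList) from
      decide_eq_decide.mpr (pvMemLower lo hi h1 h2 hh _)]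
  by_cases ha : lo ∈ c.toList <;> by_cases hb : hi ∈ c.toList <;> simp [ha, hb]

theorem pvCountryx (l : List String) : countryx l = pvFirstWith "x" l := by
  induction l with
  | nil => rfl
  | cons c t ih =>
    rw [show countryx (c :: t)
          = (if PySem.Str.isIn "x" c then some c
             else if PySem.Str.isIn "X" c then some c else countryx t) from rfl]
    rw [pvFirstWith, List.find?_cons]
    rw [pvLowerIsIn 'x' 'X' "x" "X" (by decide) (by decide) (by decide) (by decide) (by decide) c]
    by_cases hx : PySem.Str.isIn "x" c = true <;> by_cases hX : PySem.Str.isIn "X" c = true <;>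
      simp only [hx, hX, Bool.or_true, Bool.or_false, if_pos,
        Bool.false_eq_true, if_false] <;>
      first
        | rfl
        | simpa [pvFirstWith] using ih

theorem pvCountryj (l : List String) : countryj l = pvFirstWith "j" l := by
  induction l with
  | nil => rfl
  | cons c t ih =>
    rw [show countryj (c :: t)
          = (if PySem.Str.isIn "j" c then some c
             else if PySem.Str.isIn "J" c then some c else countryj t) from rfl]
    rw [pvFirstWith, List.find?_cons]
    rw [pvLowerIsIn 'j' 'J' "j" "J" (by decide) (by decide) (by decide) (by decide) (by decide) c]
    by_cases hx : PySem.Str.isIn "j" c = true <;> by_cases hX : PySem.Str.isIn "J" c = true <;>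
      simp only [hx, hX, Bool.or_true, Bool.or_false, if_pos,
        Bool.false_eq_true, if_false] <;>
      first
        | rfl
        | simpa [pvFirstWith] using ih

theorem pvCountryk (l : List String) : countryk l = pvFirstWith "k" l := by
  induction l with
  | nil => rfl
  | cons c t ih =>
    rw [show countryk (c :: t)
          = (if PySem.Str.isIn "k" c then some c
             else if PySem.Str.isIn "K" c then some c else countryk t) from rfl]
    rw [pvFirstWith, List.find?_cons]
    rw [pvLowerIsIn 'k' 'K' "k" "K" (by decide) (by decide) (by decide) (by decide) (by decide) c]
    by_cases hx : PySem.Str.isIn "k" c = true <;> by_cases hX : PySem.Str.isIn "K" c = true <;>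
      simp only [hx, hX, Bool.or_true, Bool.or_false, if_pos,
        Bool.false_eq_true, if_false] <;>
      first
        | rfl
        | simpa [pvFirstWith] using ih

theorem pvCountalphchars (l : List String) :
    countalphchars l = PySem.List.sorted (l.map countalphinstring) (fun x => x) true := by
  rw [countalphchars, PySem.List.foldl_append_singleton_eq_map, List.nil_append]

-- ===== VERDICT (by name: the statement is the Claim_ definition above) =====
theorem alphabet_set_spec : Claim_equal_alphabet_set := by
  intro list _ _
  show alphabet_set list = alphabet_set_alt list
  have hmap : list.map pvCountB = list.map countalphinstring :=
    List.map_congr_left (fun c _ => pvCount_eq c)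
  have hbody : ∀ (res : List (Option String)), ∀ c ∈ list,
      (let r0 := if countalphinstring c = PySem.List.pyGetD (countalphchars list) 0 (-1) then res ++ [some c] else res
       let r1 := if countalphinstring c = PySem.List.pyGetD (countalphchars list) 1 (-1) then r0 ++ [some c] else r0
       let r2 := if countalphinstring c = PySem.List.pyGetD (countalphchars list) 2 (-1) then r1 ++ [some c] else r1
       if countalphinstring c = PySem.List.pyGetD (countalphchars list) 4 (-1) then r2 ++ [some c] else r2)
      = res ++ (([PySem.List.pyGetD (countalphchars list) 0 (-1), PySem.List.pyGetD (countalphchars list) 1 (-1),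
                  PySem.List.pyGetD (countalphchars list) 2 (-1), PySem.List.pyGetD (countalphchars list) 4 (-1)].filter
            (fun t => countalphinstring c == t)).map (fun _ => (some c : Option String))) := by
    intro res c _
    dsimp only
    simp only [List.filter_cons, List.filter_nil, beq_iff_eq]
    split_ifs <;> simp
  have hL : List.foldl (fun result country =>
      let r0 := if countalphinstring country = PySem.List.pyGetD (countalphchars list) 0 (-1) then result ++ [some country] else result
      let r1 := if countalphinstring country = PySem.List.pyGetD (countalphchars list) 1 (-1) then r0 ++ [some country] else r0
      let r2 := if countalphinstring country = PySem.List.pyGetD (countalphchars list) 2 (-1) then r1 ++ [some country] else r1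
      if countalphinstring country = PySem.List.pyGetD (countalphchars list) 4 (-1) then r2 ++ [some country] else r2) [] list
      = list.flatMap (fun c =>
          (([PySem.List.pyGetD (countalphchars list) 0 (-1), PySem.List.pyGetD (countalphchars list) 1 (-1),
             PySem.List.pyGetD (countalphchars list) 2 (-1), PySem.List.pyGetD (countalphchars list) 4 (-1)].filter
            (fun t => countalphinstring c == t)).map (fun _ => (some c : Option String)))) := by
    exact (PySem.List.foldl_congr_mem list _ _ [] hbody).trans
      ((PySem.List.foldl_append_eq_flatMap _ list []).trans (List.nil_append _))
  have h1 : alphabet_set list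
      = list.flatMap (fun c =>
          (([PySem.List.pyGetD (countalphchars list) 0 (-1), PySem.List.pyGetD (countalphchars list) 1 (-1),
             PySem.List.pyGetD (countalphchars list) 2 (-1), PySem.List.pyGetD (countalphchars list) 4 (-1)].filter
            (fun t => countalphinstring c == t)).map (fun _ => (some c : Option String))))
        ++ [pvFirstWith "x" list, pvFirstWith "j" list, pvFirstWith "k" list] := by
    show ((List.foldl _ [] list ++ [countryx list]) ++ [countryj list]) ++ [countryk list] = _
    rw [hL, pvCountryx, pvCountryj, pvCountryk]
    simp [List.append_assoc]
  have h2 : alphabet_set_alt list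
      = list.flatMap (fun c =>
          (([PySem.List.pyGetD (countalphchars list) 0 (-1), PySem.List.pyGetD (countalphchars list) 1 (-1),
             PySem.List.pyGetD (countalphchars list) 2 (-1), PySem.List.pyGetD (countalphchars list) 4 (-1)].filter
            (fun t => countalphinstring c == t)).map (fun _ => (some c : Option String))))
        ++ [pvFirstWith "x" list, pvFirstWith "j" list, pvFirstWith "k" list] := by
    show (list.zip (list.map pvCountB)).flatMap
        (fun p =>
          ([PySem.List.pyGetD (PySem.List.sorted (list.map pvCountB) (fun x => x) true) 0 (-1),
            PySem.List.pyGetD (PySem.List.sorted (list.map pvCountB) (fun x => x) true) 1 (-1),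
            PySem.List.pyGetD (PySem.List.sorted (list.map pvCountB) (fun x => x) true) 2 (-1),
            PySem.List.pyGetD (PySem.List.sorted (list.map pvCountB) (fun x => x) true) 4 (-1)].filter
              (fun t => p.2 == t)).map (fun _ => (some p.1 : Option String)))
        ++ (["x", "j", "k"].map (fun letter => pvFirstWith letter list)) = _
    rw [hmap]
    have hzip : list.zip (list.map countalphinstring)
        = list.map (fun c => (c, countalphinstring c)) := by
      have h := List.zip_map' (f := @id String) (g := countalphinstring) (l := list)
      simpa using h
    rw [hzip, List.flatMap_map, pvCountalphchars]
    rfl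
  rw [h1, h2]
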